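-- pv_equiv track=rewrite | github.com/alanvu2440/internship-auto-applier | src/handlers/icims.py | _match_dropdown_option
-- ===== SOURCE A (Python) =====
-- from typing import Dict, Any, Optional, List
--
-- def _match_dropdown_option(options: List[Dict], target: str) -> Optional[str]:
--     """Match a target value to dropdown options."""
--     target_lower = target.lower().strip()
--
--     # Exact match first
--     for opt in options:
--         if opt["text"].lower().strip() == target_lower:
--             return opt["value"]
--
--     # Contains match
--     for opt in options:
--         text = opt["text"].lower().strip()
--         if target_lower in text or text in target_lower:
--             return opt["value"]
--
--     # Partial word match
--     target_words = set(target_lower.split())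
--     best_match = None
--     best_score = 0
--     for opt in options:
--         if not opt["value"] or opt["text"].strip() in ("", "---", "-- Please Specify --", "Select"):
--             continue
--         text_words = set(opt["text"].lower().split())
--         overlap = len(target_words & text_words)
--         if overlap > best_score:
--             best_score = overlap
--             best_match = opt["value"]
--
--     return best_match
-- ===== SOURCE B (Python) =====
-- from typing import Dict, Any, Optional, List
--
-- _PLACEHOLDERS = ("", "---", "-- Please Specify --", "Select")
--
--
-- def _match_dropdown_option(options: List[Dict], target: str) -> Optional[str]:
--     """Match a target value to dropdown options in one pass over a priority key."""
--     target_lower = target.lower().strip()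
--     target_words = set(target_lower.split())
--     best = None
--     best_tier, best_sub = 1, 0
--     for opt in options:
--         text = opt["text"].lower().strip()
--         if text == target_lower:
--             tier, sub = 3, 0
--         elif target_lower in text or text in target_lower:
--             tier, sub = 2, 0
--         elif opt["value"] and opt["text"].strip() not in _PLACEHOLDERS:
--             tier, sub = 1, len(target_words & set(opt["text"].lower().split()))
--         else:
--             tier, sub = 1, 0
--         if tier > best_tier or (tier == best_tier and sub > best_sub):
--             best, best_tier, best_sub = opt["value"], tier, sub
--     return best
-- ===== Notes on version B (the rewrite author's own statement) =====
-- stated objective: alternative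
-- what changed: A's three separate early-returning passes over the options (exact match, substring match, best word-overlap) are replaced by a single loop that scores each option once with a (tier, overlap) priority key and keeps the strictly best one, so the list is traversed once instead of up to three times.
-- outside the precondition, e.g. on _match_dropdown_option([{'text': 'a', 'value': 'v'}, {}], 'a'): A returns 'v', B raises KeyError; on _match_dropdown_option([{'text': 'a', 'value': 'v'}, {'text': 'a'}], 'a'): A returns 'v', B returns 'v'
import Mathlib
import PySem

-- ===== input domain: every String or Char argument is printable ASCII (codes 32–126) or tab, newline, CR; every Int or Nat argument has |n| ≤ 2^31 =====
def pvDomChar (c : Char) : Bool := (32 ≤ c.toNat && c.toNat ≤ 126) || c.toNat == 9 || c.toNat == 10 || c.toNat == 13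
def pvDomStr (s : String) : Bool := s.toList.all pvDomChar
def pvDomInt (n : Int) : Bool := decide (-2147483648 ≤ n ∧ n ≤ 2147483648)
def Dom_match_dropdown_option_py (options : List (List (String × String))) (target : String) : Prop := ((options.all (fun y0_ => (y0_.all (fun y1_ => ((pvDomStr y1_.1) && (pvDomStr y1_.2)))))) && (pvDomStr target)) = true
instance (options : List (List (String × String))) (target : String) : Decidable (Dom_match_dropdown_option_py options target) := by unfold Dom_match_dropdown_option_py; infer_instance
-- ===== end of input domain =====

-- B replaces A's three early-returning passes by one pass that ranks each option with a
-- (tier, overlap) priority key and keeps the strictly best option (objective: alternative).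

-- ===== PORT A =====
-- opt["text"] / opt["value"]; Pre_ guarantees the key is present, so the default is never used.
def pvGetKey (opt : List (String × String)) (k : String) : String :=
  (PySem.Dict.mk opt).getD k ""

-- first pass: exact match on stripped lowercased text
def pvAExact (options : List (List (String × String))) (tl : String) : Option String :=
  match options with
  | [] => none
  | opt :: rest =>
    if PySem.Str.strip (PySem.Str.lower (pvGetKey opt "text")) = tl then some (pvGetKey opt "value")
    else pvAExact rest tl

-- second pass: substring match either way
def pvAContains (options : List (List (String × String))) (tl : String) : Option String :=
  match options with
  | [] => none
  | opt :: rest =>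
    let text := PySem.Str.strip (PySem.Str.lower (pvGetKey opt "text"))
    if PySem.Str.isIn tl text || PySem.Str.isIn text tl then some (pvGetKey opt "value")
    else pvAContains rest tl

-- third pass: best word-overlap, accumulators best_match / best_score
def pvAOverlap (options : List (List (String × String))) (tw : PySem.Set String)
    (bestMatch : Option String) (bestScore : Int) : Option String :=
  match options with
  | [] => bestMatch
  | opt :: rest =>
    if pvGetKey opt "value" = "" ∨ PySem.Str.strip (pvGetKey opt "text") ∈ (["", "---", "-- Please Specify --", "Select"] : List String) then
      pvAOverlap rest tw bestMatch bestScore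
    else
      let xw : PySem.Set String := PySem.Set.ofList (PySem.Str.split₀ (PySem.Str.lower (pvGetKey opt "text")))
      let overlap : Int := (PySem.Set.inter tw xw).length
      if overlap > bestScore then pvAOverlap rest tw (some (pvGetKey opt "value")) overlap
      else pvAOverlap rest tw bestMatch bestScore

def match_dropdown_option_py (options : List (List (String × String))) (target : String) : Option String :=
  let tl := PySem.Str.strip (PySem.Str.lower target)
  match pvAExact options tl with
  | some v => some v
  | none =>
    match pvAContains options tl with
    | some v => some v
    | none =>
      let tw : PySem.Set String := PySem.Set.ofList (PySem.Str.split₀ tl)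
      pvAOverlap options tw none 0

-- ===== PORT B =====
-- priority key of one option: tier 3 exact, tier 2 substring, tier 1 with word overlap (filtered)
def pvBKey (opt : List (String × String)) (tl : String) (tw : PySem.Set String) : Int × Int :=
  let text := PySem.Str.strip (PySem.Str.lower (pvGetKey opt "text"))
  if text = tl then (3, 0)
  else if PySem.Str.isIn tl text || PySem.Str.isIn text tl then (2, 0)
  else if pvGetKey opt "value" ≠ "" ∧ PySem.Str.strip (pvGetKey opt "text") ∉ (["", "---", "-- Please Specify --", "Select"] : List String) then
    (1, ((PySem.Set.inter tw (PySem.Set.ofList (PySem.Str.split₀ (PySem.Str.lower (pvGetKey opt "text"))))).length : Int))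
  else (1, 0)

-- one loop step: strict (tier, sub) comparison, so the first occurrence wins ties
def pvBStep (tl : String) (tw : PySem.Set String)
    (st : Option String × Int × Int) (opt : List (String × String)) : Option String × Int × Int :=
  match st with
  | (best, bestTier, bestSub) =>
    let key := pvBKey opt tl tw
    if key.1 > bestTier ∨ (key.1 = bestTier ∧ key.2 > bestSub) then (some (pvGetKey opt "value"), key)
    else (best, bestTier, bestSub)

def match_dropdown_option_py_alt (options : List (List (String × String))) (target : String) : Option String :=
  let tl := PySem.Str.strip (PySem.Str.lower target)
  let tw : PySem.Set String := PySem.Set.ofList (PySem.Str.split₀ tl)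
  (options.foldl (pvBStep tl tw) (none, 1, 0)).1

-- ===== PRECONDITION & SPEC =====
-- Pre_ excludes option lists containing a dict without a "text" or "value" key: on such
-- inputs Python A raises KeyError, or returns only because an exact/substring match is found
-- before the missing key is read — and there the single-pass B may itself raise KeyError, so
-- those inputs stay outside the claim.
def Pre_match_dropdown_option_py (options : List (List (String × String))) (target : String) : Prop :=
  ∀ opt ∈ options, "text" ∈ opt.map Prod.fst ∧ "value" ∈ opt.map Prod.fst
instance (options : List (List (String × String))) (target : String) : Decidable (Pre_match_dropdown_option_py options target) := by unfold Pre_match_dropdown_option_py; infer_instance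

def pvWitness_match_dropdown_option_py : (List (List (String × String))) × String :=
  ([[("text", "Yes"), ("value", "1")], [("text", "---"), ("value", "")]], "yes")

def Spec_match_dropdown_option_py (options : List (List (String × String))) (target : String) (out : Option String) : Prop := out = match_dropdown_option_py_alt options target
instance (options : List (List (String × String))) (target : String) (out : Option String) : Decidable (Spec_match_dropdown_option_py options target out) := by unfold Spec_match_dropdown_option_py; infer_instance

-- ===== CLAIM (what is proved, stated in full; the proofs are below) =====
def Claim_equal_match_dropdown_option_py : Prop := ∀ (options : List (List (String × String))) (target : String), Dom_match_dropdown_option_py options target → Pre_match_dropdown_option_py options target → Spec_match_dropdown_option_py options target (match_dropdown_option_py options target)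

-- ===== LEMMAS AND PROOFS =====

-- the pair-valued version of A's third pass, used to state the loop invariant
def pvAOverlapP (options : List (List (String × String))) (tw : PySem.Set String)
    (bestMatch : Option String) (bestScore : Int) : Option String × Int :=
  match options with
  | [] => (bestMatch, bestScore)
  | opt :: rest =>
    if pvGetKey opt "value" = "" ∨ PySem.Str.strip (pvGetKey opt "text") ∈ (["", "---", "-- Please Specify --", "Select"] : List String) then
      pvAOverlapP rest tw bestMatch bestScore
    else
      let xw : PySem.Set String := PySem.Set.ofList (PySem.Str.split₀ (PySem.Str.lower (pvGetKey opt "text")))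
      let overlap : Int := (PySem.Set.inter tw xw).length
      if overlap > bestScore then pvAOverlapP rest tw (some (pvGetKey opt "value")) overlap
      else pvAOverlapP rest tw bestMatch bestScore

theorem pvAOverlapP_fst (options : List (List (String × String))) (tw : PySem.Set String)
    (b : Option String) (s : Int) : (pvAOverlapP options tw b s).1 = pvAOverlap options tw b s := by
  induction options generalizing b s with
  | nil => rfl
  | cons opt rest ih =>
    simp only [pvAOverlapP, pvAOverlap]
    split_ifs <;> apply ih

-- the four possible priority keys of one option
theorem pvBKey_exact (opt : List (String × String)) (tl : String) (tw : PySem.Set String)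
    (hx : PySem.Str.strip (PySem.Str.lower (pvGetKey opt "text")) = tl) :
    pvBKey opt tl tw = (3, 0) := by
  simp only [pvBKey, if_pos hx]

theorem pvBKey_contains (opt : List (String × String)) (tl : String) (tw : PySem.Set String)
    (hx : ¬ PySem.Str.strip (PySem.Str.lower (pvGetKey opt "text")) = tl)
    (hc : (PySem.Str.isIn tl (PySem.Str.strip (PySem.Str.lower (pvGetKey opt "text"))) ||
      PySem.Str.isIn (PySem.Str.strip (PySem.Str.lower (pvGetKey opt "text"))) tl) = true) :
    pvBKey opt tl tw = (2, 0) := by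
  simp only [pvBKey, if_neg hx, if_pos hc]

theorem pvBKey_overlap (opt : List (String × String)) (tl : String) (tw : PySem.Set String)
    (hx : ¬ PySem.Str.strip (PySem.Str.lower (pvGetKey opt "text")) = tl)
    (hc : (PySem.Str.isIn tl (PySem.Str.strip (PySem.Str.lower (pvGetKey opt "text"))) ||
      PySem.Str.isIn (PySem.Str.strip (PySem.Str.lower (pvGetKey opt "text"))) tl) = false)
    (hf : pvGetKey opt "value" ≠ "" ∧ PySem.Str.strip (pvGetKey opt "text") ∉ (["", "---", "-- Please Specify --", "Select"] : List String)) :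
    pvBKey opt tl tw = (1, ((PySem.Set.inter tw (PySem.Set.ofList (PySem.Str.split₀ (PySem.Str.lower (pvGetKey opt "text"))))).length : Int)) := by
  simp only [pvBKey, if_neg hx, hc, Bool.false_eq_true, if_false, if_pos hf]

theorem pvBKey_skip (opt : List (String × String)) (tl : String) (tw : PySem.Set String)
    (hx : ¬ PySem.Str.strip (PySem.Str.lower (pvGetKey opt "text")) = tl)
    (hc : (PySem.Str.isIn tl (PySem.Str.strip (PySem.Str.lower (pvGetKey opt "text"))) ||
      PySem.Str.isIn (PySem.Str.strip (PySem.Str.lower (pvGetKey opt "text"))) tl) = false)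
    (hf : ¬ (pvGetKey opt "value" ≠ "" ∧ PySem.Str.strip (pvGetKey opt "text") ∉ (["", "---", "-- Please Specify --", "Select"] : List String))) :
    pvBKey opt tl tw = (1, 0) := by
  simp only [pvBKey, if_neg hx, hc, Bool.false_eq_true, if_false, if_neg hf]

theorem pvBKey_bounds (opt : List (String × String)) (tl : String) (tw : PySem.Set String) :
    (pvBKey opt tl tw).1 ≤ 3 ∧ ((pvBKey opt tl tw).1 = 3 → (pvBKey opt tl tw).2 = 0) ∧
      ((pvBKey opt tl tw).1 = 2 → (pvBKey opt tl tw).2 = 0) := by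
  simp only [pvBKey]
  split_ifs <;> norm_num

theorem pvBKey_fst_le_two (opt : List (String × String)) (tl : String) (tw : PySem.Set String)
    (hx : ¬ PySem.Str.strip (PySem.Str.lower (pvGetKey opt "text")) = tl) :
    (pvBKey opt tl tw).1 ≤ 2 := by
  simp only [pvBKey, if_neg hx]
  split_ifs <;> norm_num

-- once the best key has tier 3 the fold never updates again
theorem pvFold_tier3 (options : List (List (String × String))) (tl : String)
    (tw : PySem.Set String) (b : Option String) :
    options.foldl (pvBStep tl tw) (b, 3, 0) = (b, 3, 0) := by
  induction options with
  | nil => rfl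
  | cons opt rest ih =>
    have hstep : pvBStep tl tw (b, 3, 0) opt = (b, 3, 0) := by
      simp only [pvBStep]
      rw [if_neg]
      obtain ⟨h1, h2, -⟩ := pvBKey_bounds opt tl tw
      rintro (h | ⟨h, h'⟩)
      · omega
      · rw [h2 h] at h'; omega
    rw [List.foldl_cons, hstep, ih]

-- from a tier-2 state only an exact match can still win
theorem pvFold_tier2 (options : List (List (String × String))) (tl : String)
    (tw : PySem.Set String) (b : Option String) :
    options.foldl (pvBStep tl tw) (b, 2, 0) =
      match pvAExact options tl with
      | some v => (some v, 3, 0)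
      | none => (b, 2, 0) := by
  induction options generalizing b with
  | nil => rfl
  | cons opt rest ih =>
    by_cases hx : PySem.Str.strip (PySem.Str.lower (pvGetKey opt "text")) = tl
    · have hstep : pvBStep tl tw (b, 2, 0) opt = (some (pvGetKey opt "value"), 3, 0) := by
        simp only [pvBStep]
        rw [pvBKey_exact opt tl tw hx, if_pos (Or.inl (by norm_num))]
      rw [List.foldl_cons, hstep, pvFold_tier3]
      simp only [pvAExact, if_pos hx]
    · have hstep : pvBStep tl tw (b, 2, 0) opt = (b, 2, 0) := by
        simp only [pvBStep]
        rw [if_neg]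
        have h1 := pvBKey_fst_le_two opt tl tw hx
        obtain ⟨-, -, h2⟩ := pvBKey_bounds opt tl tw
        rintro (h | ⟨h, h'⟩)
        · omega
        · rw [h2 h] at h'; omega
      rw [List.foldl_cons, hstep, ih]
      simp only [pvAExact, if_neg hx]

-- main invariant: from a tier-1 state the fold computes A's three-pass cascade
theorem pvFold_tier1 (options : List (List (String × String))) (tl : String)
    (tw : PySem.Set String) (b : Option String) (s : Int) (hs : 0 ≤ s) :
    options.foldl (pvBStep tl tw) (b, 1, s) =
      match pvAExact options tl with
      | some v => (some v, 3, 0)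
      | none =>
        match pvAContains options tl with
        | some v => (some v, 2, 0)
        | none => ((pvAOverlapP options tw b s).1, 1, (pvAOverlapP options tw b s).2) := by
  induction options generalizing b s with
  | nil => rfl
  | cons opt rest ih =>
    by_cases hx : PySem.Str.strip (PySem.Str.lower (pvGetKey opt "text")) = tl
    · have hstep : pvBStep tl tw (b, 1, s) opt = (some (pvGetKey opt "value"), 3, 0) := by
        simp only [pvBStep]
        rw [pvBKey_exact opt tl tw hx, if_pos (Or.inl (by norm_num))]
      rw [List.foldl_cons, hstep, pvFold_tier3]
      simp only [pvAExact, if_pos hx]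
    · cases hc : (PySem.Str.isIn tl (PySem.Str.strip (PySem.Str.lower (pvGetKey opt "text"))) ||
          PySem.Str.isIn (PySem.Str.strip (PySem.Str.lower (pvGetKey opt "text"))) tl) with
      | true =>
        have hstep : pvBStep tl tw (b, 1, s) opt = (some (pvGetKey opt "value"), 2, 0) := by
          simp only [pvBStep]
          rw [pvBKey_contains opt tl tw hx hc, if_pos (Or.inl (by norm_num))]
        rw [List.foldl_cons, hstep, pvFold_tier2]
        simp only [pvAExact, pvAContains, if_neg hx, if_pos hc]
      | false =>
        by_cases hf : pvGetKey opt "value" = "" ∨ PySem.Str.strip (pvGetKey opt "text") ∈ (["", "---", "-- Please Specify --", "Select"] : List String)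
        · -- the option is filtered out: neither loop updates its state
          have hnf : ¬ (pvGetKey opt "value" ≠ "" ∧ PySem.Str.strip (pvGetKey opt "text") ∉ (["", "---", "-- Please Specify --", "Select"] : List String)) := by
            rintro ⟨h1, h2⟩
            rcases hf with h | h
            exacts [h1 h, h2 h]
          have hstep : pvBStep tl tw (b, 1, s) opt = (b, 1, s) := by
            simp only [pvBStep]
            rw [pvBKey_skip opt tl tw hx hc hnf, if_neg]
            rintro (h | ⟨-, h⟩)
            · exact absurd h (by norm_num)
            · exact absurd (show (0:Int) > s from h) (by omega)
          rw [List.foldl_cons, hstep, ih b s hs]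
          simp only [pvAExact, pvAContains, pvAOverlapP, if_neg hx, hc, Bool.false_eq_true,
            if_false, if_pos hf]
        · -- the option competes on word overlap, exactly as in A's third pass
          have hf' : pvGetKey opt "value" ≠ "" ∧ PySem.Str.strip (pvGetKey opt "text") ∉ (["", "---", "-- Please Specify --", "Select"] : List String) := by
            constructor
            · intro h; exact hf (Or.inl h)
            · intro h; exact hf (Or.inr h)
          set ov : Int := ((PySem.Set.inter tw (PySem.Set.ofList (PySem.Str.split₀ (PySem.Str.lower (pvGetKey opt "text"))))).length : Int) with hov
          have hov0 : (0:Int) ≤ ov := by positivity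
          by_cases hgt : ov > s
          · have hstep : pvBStep tl tw (b, 1, s) opt = (some (pvGetKey opt "value"), 1, ov) := by
              simp only [pvBStep]
              rw [pvBKey_overlap opt tl tw hx hc hf', ← hov, if_pos (Or.inr ⟨rfl, hgt⟩)]
            rw [List.foldl_cons, hstep, ih _ ov hov0]
            simp only [pvAExact, pvAContains, pvAOverlapP, if_neg hx, hc, Bool.false_eq_true,
              if_false, if_neg hf, ← hov, if_pos hgt]
          · have hstep : pvBStep tl tw (b, 1, s) opt = (b, 1, s) := by
              simp only [pvBStep]
              rw [pvBKey_overlap opt tl tw hx hc hf', ← hov, if_neg]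
              rintro (h | ⟨-, h⟩)
              · exact absurd h (by norm_num)
              · exact hgt h
            rw [List.foldl_cons, hstep, ih b s hs]
            simp only [pvAExact, pvAContains, pvAOverlapP, if_neg hx, hc, Bool.false_eq_true,
              if_false, if_neg hf, ← hov, if_neg hgt]

-- ===== VERDICT (by name: the statement is the Claim_ definition above) =====
theorem match_dropdown_option_py_spec : Claim_equal_match_dropdown_option_py := by
  intro options target _ _
  unfold Spec_match_dropdown_option_py
  simp only [match_dropdown_option_py, match_dropdown_option_py_alt]
  rw [pvFold_tier1 _ _ _ _ _ le_rfl]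
  cases hx : pvAExact options (PySem.Str.strip (PySem.Str.lower target)) with
  | some v => simp
  | none =>
    cases hc : pvAContains options (PySem.Str.strip (PySem.Str.lower target)) with
    | some v => simp
    | none => simp [pvAOverlapP_fst]
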